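-- pv_equiv track=rewrite | github.com/CardinisCode/learning-python | finalproblems/finalproblem8.py | find_most_common_girl_name_beginning_with_Q
-- ===== SOURCE A (Python) =====
-- def find_most_common_girl_name_beginning_with_Q(baby_names_database):
--     most_common_girl_name = ""
--     most_occurences = 0
--     for name in baby_names_database.keys():
--         first_letter = name[0]
--         if first_letter == "Q" and baby_names_database[name]['Girl'] > 0:
--             current_name_occurences = baby_names_database[name]['Girl']
--             if current_name_occurences > most_occurences:
--                 most_occurences = current_name_occurences
--                 most_common_girl_name = name
--
--     return most_common_girl_name
-- ===== SOURCE B (Python) =====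
-- def find_most_common_girl_name_beginning_with_Q(baby_names_database):
--     qgirls = [(name, data['Girl']) for name, data in baby_names_database.items()
--               if name[0] == "Q" and data['Girl'] > 0]
--     if not qgirls:
--         return ""
--     best = max(count for _, count in qgirls)
--     for name, count in qgirls:
--         if count == best:
--             return name
-- ===== Notes on version B (the rewrite author's own statement) =====
-- stated objective: alternative
-- what changed: Replaces the single running-max scan over keys with repeated dict lookups by a build-then-select decomposition: build the filtered (name, count) candidate list from items() once, take the maximum count, then return the first name achieving it.
import Mathlib
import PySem

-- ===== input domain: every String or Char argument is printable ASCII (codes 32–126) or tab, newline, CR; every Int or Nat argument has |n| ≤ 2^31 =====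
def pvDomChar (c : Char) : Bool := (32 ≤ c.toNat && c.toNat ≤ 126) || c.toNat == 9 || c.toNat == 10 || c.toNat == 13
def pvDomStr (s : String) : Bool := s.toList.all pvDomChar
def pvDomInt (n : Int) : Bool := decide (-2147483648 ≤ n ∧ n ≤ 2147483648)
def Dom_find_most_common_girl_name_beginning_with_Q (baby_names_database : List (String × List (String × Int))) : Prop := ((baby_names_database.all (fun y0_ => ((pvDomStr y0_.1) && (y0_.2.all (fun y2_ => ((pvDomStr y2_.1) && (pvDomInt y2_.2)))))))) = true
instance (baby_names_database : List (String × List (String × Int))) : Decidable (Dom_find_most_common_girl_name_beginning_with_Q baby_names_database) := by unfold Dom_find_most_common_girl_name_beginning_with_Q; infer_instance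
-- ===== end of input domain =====

-- B replaces A's running-max scan over keys (with dict lookups) by a build-then-select
-- decomposition: filter (name, count) candidates once, take the max count, return the
-- first name achieving it. Objective: alternative (same cost, different structure).


-- ===== PORT A =====
-- d['Girl'] (first-match lookup; the default 0 is unreachable under Pre_, where the key is present)
def pvGirl (d : List (String × Int)) : Int :=
  (((d.find? (fun q => q.1 == "Girl")).map (·.2)).getD 0)

-- baby_names_database[name] (first-match lookup; name always comes from the key list, so the default is unreachable)
def pvLookup (db : List (String × List (String × Int))) (name : String) : List (String × Int) :=
  (((db.find? (fun p => p.1 == name)).map (·.2)).getD [])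

def find_most_common_girl_name_beginning_with_Q (baby_names_database : List (String × List (String × Int))) : String :=
  ((baby_names_database.map (·.1)).foldl
    (fun (st : String × Int) name =>
      -- first_letter = name[0]  (empty names are excluded by Pre_, where Python raises IndexError)
      let first_letter := name.toList.headD ' '
      if first_letter = 'Q' ∧ pvGirl (pvLookup baby_names_database name) > 0 then
        let current_name_occurences := pvGirl (pvLookup baby_names_database name)
        if current_name_occurences > st.2 then (name, current_name_occurences) else st
      else st)
    ("", 0)).1

-- ===== PORT B =====
def find_most_common_girl_name_beginning_with_Q_alt (baby_names_database : List (String × List (String × Int))) : String :=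
  let qgirls := baby_names_database.filterMap (fun p =>
    if p.1.toList.headD ' ' = 'Q' ∧ pvGirl p.2 > 0 then some (p.1, pvGirl p.2) else none)
  match qgirls with
  | [] => ""
  | c :: rest =>
    let best := (rest.map (·.2)).foldl max c.2
    ((((c :: rest).find? (fun q => q.2 == best)).map (·.1)).getD "")

-- ===== PRECONDITION & SPEC =====
-- Pre_ excludes (a) duplicate keys, which a Python dict cannot have (the argument is a dict),
-- (b) empty-string keys (name[0] raises IndexError), (c) keys starting with 'Q' whose inner
-- dict lacks 'Girl' (raises KeyError).
def Pre_find_most_common_girl_name_beginning_with_Q (baby_names_database : List (String × List (String × Int))) : Prop :=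
  (baby_names_database.map (·.1)).Nodup ∧
  ∀ p ∈ baby_names_database, p.1 ≠ "" ∧
    (p.1.toList.headD ' ' = 'Q' → (p.2.map (·.1)).contains "Girl" = true)
instance (baby_names_database : List (String × List (String × Int))) : Decidable (Pre_find_most_common_girl_name_beginning_with_Q baby_names_database) := by unfold Pre_find_most_common_girl_name_beginning_with_Q; infer_instance

def pvWitness_find_most_common_girl_name_beginning_with_Q : (List (String × List (String × Int))) :=
  [("Quinn", [("Girl", 3), ("Boy", 1)]), ("Ann", [("Girl", 9)]), ("Quil", [("Girl", 3)])]

def Spec_find_most_common_girl_name_beginning_with_Q (baby_names_database : List (String × List (String × Int))) (out : String) : Prop := out = find_most_common_girl_name_beginning_with_Q_alt baby_names_database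
instance (baby_names_database : List (String × List (String × Int))) (out : String) : Decidable (Spec_find_most_common_girl_name_beginning_with_Q baby_names_database out) := by unfold Spec_find_most_common_girl_name_beginning_with_Q; infer_instance

-- ===== CLAIM (what is proved, stated in full; the proofs are below) =====
def Claim_equal_find_most_common_girl_name_beginning_with_Q : Prop := ∀ (baby_names_database : List (String × List (String × Int))), Dom_find_most_common_girl_name_beginning_with_Q baby_names_database → Pre_find_most_common_girl_name_beginning_with_Q baby_names_database → Spec_find_most_common_girl_name_beginning_with_Q baby_names_database (find_most_common_girl_name_beginning_with_Q baby_names_database)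

-- ===== LEMMAS AND PROOFS =====

-- A's loop step, over a (name, girl-count) pair.
def pvStep (st q : String × Int) : String × Int := if q.2 > st.2 then q else st

-- the foldl-max value is the initial value or an element of the list
theorem pvFoldlMaxMem (vs : List Int) (a : Int) :
    vs.foldl max a = a ∨ vs.foldl max a ∈ vs := by
  induction vs generalizing a with
  | nil => simp
  | cons v vs ih =>
    simp only [List.foldl_cons, List.mem_cons]
    rcases ih (max a v) with h | h
    · rw [h]
      rcases max_choice a v with hm | hm
      · exact Or.inl hm
      · exact Or.inr (Or.inl hm)
    · exact Or.inr (Or.inr h)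

-- Running strict-max fold = (first name achieving the max, the max).
theorem pvRunMax (cs : List (String × Int)) (n0 : String) (v0 : Int) :
    cs.foldl pvStep (n0, v0) =
      ((if (cs.map (·.2)).foldl max v0 = v0 then n0
        else (((cs.find? (fun q => q.2 == (cs.map (·.2)).foldl max v0)).map (·.1)).getD n0)),
       (cs.map (·.2)).foldl max v0) := by
  induction cs generalizing n0 v0 with
  | nil => simp
  | cons c rest ih =>
    have hbase : ∀ w : Int, w ≤ (rest.map (·.2)).foldl max w :=
      fun w => (PySem.List.le_foldl_max _ w).1
    by_cases hc : c.2 > v0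
    · have hmax : max v0 c.2 = c.2 := by omega
      simp only [List.foldl_cons, List.map_cons, hmax]
      have hstep1 : pvStep (n0, v0) c = (c.1, c.2) := by
        simp [pvStep, hc]
      rw [hstep1, ih]
      have hM : c.2 ≤ (rest.map (·.2)).foldl max c.2 := hbase c.2
      by_cases hMe : (rest.map (·.2)).foldl max c.2 = v0
      · omega
      · rw [if_neg hMe]
        by_cases he : (rest.map (·.2)).foldl max c.2 = c.2
        · simp [he]
        · have : (c.2 == (rest.map (·.2)).foldl max c.2) = false := by
            simp; omega
          have hach : (rest.map (·.2)).foldl max c.2 ∈ rest.map (·.2) := by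
            rcases pvFoldlMaxMem (rest.map (·.2)) c.2 with h | h
            · exact absurd h he
            · exact h
          rcases List.mem_map.mp hach with ⟨r, hr, hrv⟩
          have hsome : (rest.find? (fun q => q.2 == (rest.map (·.2)).foldl max c.2)).isSome := by
            apply List.find?_isSome.mpr
            exact ⟨r, hr, by simp [hrv]⟩
          rcases Option.isSome_iff_exists.mp hsome with ⟨w, hw⟩
          simp [this, he, hw]
    · have hmax : max v0 c.2 = v0 := by omega
      simp only [List.foldl_cons, List.map_cons, hmax]
      have hstep1 : pvStep (n0, v0) c = (n0, v0) := by
        simp [pvStep, hc]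
      rw [hstep1, ih]
      by_cases hMe : (rest.map (·.2)).foldl max v0 = v0
      · simp [hMe]
      · have hv0 : v0 ≤ (rest.map (·.2)).foldl max v0 := hbase v0
        have : (c.2 == (rest.map (·.2)).foldl max v0) = false := by
          simp; omega
        simp [hMe, this]

-- Under Nodup keys, A's per-name lookup returns the pair's own value.
theorem pvLookup_self (db : List (String × List (String × Int)))
    (hnd : (db.map (·.1)).Nodup) :
    ∀ p ∈ db, pvLookup db p.1 = p.2 := by
  induction db with
  | nil => simp
  | cons c rest ih =>
    intro p hp
    simp only [List.map_cons, List.nodup_cons] at hnd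
    rcases List.mem_cons.mp hp with hp | hp
    · subst hp; simp [pvLookup]
    · have hne : (c.1 == p.1) = false := by
        simp only [beq_eq_false_iff_ne, ne_eq]
        intro h
        exact hnd.1 (h ▸ (List.mem_map_of_mem hp))
      have := ih hnd.2 p hp
      simpa [pvLookup, List.find?_cons, hne] using this

theorem pv_main (db : List (String × List (String × Int)))
    (hnd : (db.map (·.1)).Nodup) :
    find_most_common_girl_name_beginning_with_Q db
      = find_most_common_girl_name_beginning_with_Q_alt db := by
  unfold find_most_common_girl_name_beginning_with_Q find_most_common_girl_name_beginning_with_Q_alt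
  rw [List.foldl_map]
  have hstep : db.foldl
      (fun (st : String × Int) p =>
        let first_letter := p.1.toList.headD ' '
        if first_letter = 'Q' ∧ pvGirl (pvLookup db p.1) > 0 then
          let cur := pvGirl (pvLookup db p.1)
          if cur > st.2 then (p.1, cur) else st
        else st) ("", 0)
      = (db.filterMap (fun p =>
          if p.1.toList.headD ' ' = 'Q' ∧ pvGirl p.2 > 0 then some (p.1, pvGirl p.2) else none)).foldl
          pvStep ("", 0) := by
    rw [List.foldl_filterMap]
    apply PySem.List.foldl_congr_mem
    intro st p hp
    rw [pvLookup_self db hnd p hp]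
    by_cases h : p.1.toList.headD ' ' = 'Q' ∧ pvGirl p.2 > 0
    · simp only [if_pos h]
      rfl
    · simp only [if_neg h]
  rw [hstep]
  set cs := db.filterMap (fun p =>
    if p.1.toList.headD ' ' = 'Q' ∧ pvGirl p.2 > 0 then some (p.1, pvGirl p.2) else none) with hcs
  have hpos : ∀ q ∈ cs, 0 < q.2 := by
    intro q hq
    rw [hcs] at hq
    rcases List.mem_filterMap.mp hq with ⟨p, _, hpq⟩
    split_ifs at hpq with h
    · cases hpq; exact h.2
  rw [pvRunMax]
  match cs, hpos with
  | [], _ => simp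
  | c :: rest, hpos =>
    have hc : 0 < c.2 := hpos c (by simp)
    have h2 : ((c :: rest).map (·.2)).foldl max 0 = (rest.map (·.2)).foldl max c.2 := by
      simp only [List.map_cons, List.foldl_cons]
      congr 1
      omega
    have hM : c.2 ≤ (rest.map (·.2)).foldl max c.2 := (PySem.List.le_foldl_max _ c.2).1
    rw [h2]
    rw [if_neg (by omega)]

-- ===== VERDICT (by name: the statement is the Claim_ definition above) =====
theorem find_most_common_girl_name_beginning_with_Q_spec : Claim_equal_find_most_common_girl_name_beginning_with_Q := by
  intro db _ hpre
  exact pv_main db hpre.1
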